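-- pv_equiv track=rewrite | github.com/magnusdv/filtus | filtus/FiltusUtils.py | interval_set_intersection
-- ===== SOURCE A (Python) =====
-- def interval_union(x):
--     '''
--     Union of intervals.
--     x: a sequence of intervals of the form (start, end) or [start, end]
--     output: list of union intervals
--     '''
--     z = sorted(x, reverse=1) # to use pop()
--     res = []
--     a,b = z.pop()
--     while z:
--         c,d = z.pop()
--         if c <= b:
--             b = max(b,d)
--         else:
--             res.append([a,b])
--             a,b = c,d
--     res.append([a,b])
--     return res
--
-- def interval_set_intersection(x, y):
--     '''
--     Intersection of two interval sets.
--     x, y: sequences of intervals of the form (start, end) or [start, end]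
--     output: list of intersection intervals
--     '''
--     x = interval_union(x) # the algorithm below assumes that the intervals in x (and y) are disjoint
--     y = interval_union(y)
--     z = sorted(x+y, reverse=1) # to use pop()
--     res = []
--     a,b = z.pop()
--     while z:
--         c,d = z.pop()
--         if c <= b: # non-empty intersection (assumes each of x and y are disjoint!)
--             res.append([c, min(b,d)])
--             a,b = min(b,d), max(b,d)
--         else:
--             a,b = c,d
--     return res
-- ===== SOURCE B (Python) =====
-- def interval_union(x):
--     '''
--     Union of intervals.
--     x: a sequence of intervals of the form (start, end) or [start, end]
--     output: list of union intervals
--     '''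
--     z = sorted(x, reverse=1) # to use pop()
--     res = []
--     a,b = z.pop()
--     while z:
--         c,d = z.pop()
--         if c <= b:
--             b = max(b,d)
--         else:
--             res.append([a,b])
--             a,b = c,d
--     res.append([a,b])
--     return res
--
-- def interval_set_intersection(x, y):
--     '''
--     Intersection of two interval sets: instead of concatenating and re-sorting
--     the two (already sorted) unions, stream them with two index pointers,
--     merging on the fly; only the active end is tracked.
--     '''
--     x = interval_union(x)
--     y = interval_union(y)
--     if x[0] <= y[0]:
--         b = x[0][1]; i, j = 1, 0
--     else:
--         b = y[0][1]; i, j = 0, 1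
--     res = []
--     while i < len(x) or j < len(y):
--         if j == len(y) or (i < len(x) and x[i] <= y[j]):
--             c, d = x[i]; i += 1
--         else:
--             c, d = y[j]; j += 1
--         if c <= b:
--             res.append([c, min(b, d)])
--             b = max(b, d)
--         else:
--             b = d
--     return res
-- ===== Notes on version B (the rewrite author's own statement) =====
-- stated objective: alternative
-- what changed: A concatenates the two unions, sorts the combined list again and sweeps it while threading a dead interval-start through its state; B never builds or sorts a combined list: it streams the two already-sorted unions with two index pointers, merging on the fly, and keeps only the active interval end.
import Mathlib
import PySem

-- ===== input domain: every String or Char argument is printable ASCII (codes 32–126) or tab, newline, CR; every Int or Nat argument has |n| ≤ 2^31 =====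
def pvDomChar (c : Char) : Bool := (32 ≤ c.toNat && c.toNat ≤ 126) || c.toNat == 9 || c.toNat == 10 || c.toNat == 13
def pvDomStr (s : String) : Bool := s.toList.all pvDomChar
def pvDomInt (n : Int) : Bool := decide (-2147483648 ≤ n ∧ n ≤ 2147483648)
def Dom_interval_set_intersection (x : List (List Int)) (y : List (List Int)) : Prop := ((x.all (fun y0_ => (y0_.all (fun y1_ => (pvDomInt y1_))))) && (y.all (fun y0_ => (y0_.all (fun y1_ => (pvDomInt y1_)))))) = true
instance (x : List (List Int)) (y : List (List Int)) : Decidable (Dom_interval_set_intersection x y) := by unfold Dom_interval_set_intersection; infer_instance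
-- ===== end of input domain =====

-- B drops A's concatenate-and-re-sort of the two unions: it streams the two sorted unions with
-- two pointers, merging on the fly, and keeps only the active interval end (alternative algorithm).

-- ===== PORT A =====

-- sorted(·, reverse=True) on lists of intervals; the lexicographic order on List Int is Python's list order
def pvSortRev (l : List (List Int)) : List (List Int) :=
  @PySem.List.sorted (List Int) (List Int) List.instLinearOrder.toLT LinearOrder.toDecidableLT l (fun v => v) true

-- the while-loop of interval_union; z holds the remaining intervals in pop order
def pvUnionLoop : List (List Int) → Int → Int → List (List Int) → List (List Int)
  | [], a, b, res => res ++ [[a, b]]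
  | e :: z, a, b, res =>
    match e with
    | [c, d] => if c ≤ b then pvUnionLoop z a (max b d) res
                else pvUnionLoop z c d (res ++ [[a, b]])
    | _ => []  -- Python: 'c,d = z.pop()' raises ValueError on a non-pair; excluded by Pre_

def interval_union (x : List (List Int)) : List (List Int) :=
  -- z = sorted(x, reverse=1); Python pops from the END of z, i.e. consumes z.reverse front to back
  match (pvSortRev x).reverse with
  | [] => []            -- Python: 'a,b = z.pop()' raises IndexError on empty input; excluded by Pre_
  | [a, b] :: z => pvUnionLoop z a b []
  | _ :: _ => []        -- Python: ValueError on a non-pair interval; excluded by Pre_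

-- the while-loop of interval_set_intersection
def pvSweepLoop : List (List Int) → Int → Int → List (List Int) → List (List Int)
  | [], _, _, res => res
  | e :: z, _, b, res =>
    match e with
    | [c, d] => if c ≤ b then pvSweepLoop z (min b d) (max b d) (res ++ [[c, min b d]])
                else pvSweepLoop z c d res
    | _ => []  -- Python: ValueError on a non-pair; excluded by Pre_

def interval_set_intersection (x : List (List Int)) (y : List (List Int)) : List (List Int) :=
  let xu := interval_union x
  let yu := interval_union y
  match (pvSortRev (xu ++ yu)).reverse with
  | [] => []            -- Python: IndexError; excluded by Pre_
  | [a, b] :: z => pvSweepLoop z a b []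
  | _ :: _ => []        -- Python: ValueError; excluded by Pre_

-- ===== PORT B =====

-- Python's '<=' on two interval lists (lexicographic)
def pvListLe (u v : List Int) : Bool := decide (u ≤ v)

-- B's while-loop: the two pointers are the two remaining suffixes; b is the active end
def pvMSLoop : List (List Int) → List (List Int) → Int → List (List Int)
  | [], [], _ => []
  | xe :: xs, [], b =>
      match xe with
      | [c, d] => if c ≤ b then [c, min b d] :: pvMSLoop xs [] (max b d) else pvMSLoop xs [] d
      | _ => []   -- Python: 'c,d = x[i]' raises ValueError on a non-pair; excluded by Pre_
  | [], ye :: ys, b =>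
      match ye with
      | [c, d] => if c ≤ b then [c, min b d] :: pvMSLoop [] ys (max b d) else pvMSLoop [] ys d
      | _ => []
  | xe :: xs, ye :: ys, b =>
      if pvListLe xe ye then
        match xe with
        | [c, d] => if c ≤ b then [c, min b d] :: pvMSLoop xs (ye :: ys) (max b d)
                    else pvMSLoop xs (ye :: ys) d
        | _ => []
      else
        match ye with
        | [c, d] => if c ≤ b then [c, min b d] :: pvMSLoop (xe :: xs) ys (max b d)
                    else pvMSLoop (xe :: xs) ys d
        | _ => []
  termination_by x y _ => x.length + y.length
  decreasing_by all_goals simp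

def interval_set_intersection_alt (x : List (List Int)) (y : List (List Int)) : List (List Int) :=
  let xu := interval_union x
  let yu := interval_union y
  match xu, yu with
  | xe :: xs, ye :: ys =>
      if pvListLe xe ye then
        match xe with
        | [_, b] => pvMSLoop xs (ye :: ys) b
        | _ => []     -- Python: ValueError; excluded by Pre_
      else
        match ye with
        | [_, b] => pvMSLoop (xe :: xs) ys b
        | _ => []
  | _, _ => []        -- Python: 'x[0]'/'y[0]' raises IndexError on empty input; excluded by Pre_

-- ===== PRECONDITION & SPEC =====

def pvIsPair : List Int → Bool
  | [_, _] => true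
  | _ => false

-- Pre_ excludes exactly the inputs on which A raises: an empty x or y (IndexError on z.pop())
-- and intervals that are not pairs (ValueError on unpacking).
def Pre_interval_set_intersection (x : List (List Int)) (y : List (List Int)) : Prop :=
  x ≠ [] ∧ y ≠ [] ∧ (∀ e ∈ x, pvIsPair e = true) ∧ (∀ e ∈ y, pvIsPair e = true)
instance (x : List (List Int)) (y : List (List Int)) : Decidable (Pre_interval_set_intersection x y) := by
  unfold Pre_interval_set_intersection; infer_instance

def pvWitness_interval_set_intersection : List (List Int) × List (List Int) :=
  ([[0, 2], [5, 6]], [[1, 5]])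

def Spec_interval_set_intersection (x : List (List Int)) (y : List (List Int)) (out : List (List Int)) : Prop := out = interval_set_intersection_alt x y
instance (x : List (List Int)) (y : List (List Int)) (out : List (List Int)) : Decidable (Spec_interval_set_intersection x y out) := by unfold Spec_interval_set_intersection; infer_instance

-- ===== CLAIM (what is proved, stated in full; the proofs are below) =====
def Claim_equal_interval_set_intersection : Prop := ∀ (x : List (List Int)) (y : List (List Int)), Dom_interval_set_intersection x y → Pre_interval_set_intersection x y → Spec_interval_set_intersection x y (interval_set_intersection x y)

-- ===== LEMMAS AND PROOFS =====

lemma pvSortRev_perm (l : List (List Int)) : (pvSortRev l).Perm l :=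
  @PySem.List.sorted_perm (List Int) (List Int) List.instLinearOrder.toLT LinearOrder.toDecidableLT l (fun v => v) true

lemma pvSortRev_eq_nil_iff (l : List (List Int)) : pvSortRev l = [] ↔ l = [] :=
  @PySem.List.sorted_eq_nil_iff (List Int) (List Int) List.instLinearOrder.toLT LinearOrder.toDecidableLT l (fun v => v) true

lemma pvSortRev_mem (v : List Int) (l : List (List Int)) : v ∈ pvSortRev l ↔ v ∈ l :=
  (pvSortRev_perm l).mem_iff

lemma pvSortRev_reverse_pairwise (l : List (List Int)) :
    (pvSortRev l).reverse.Pairwise (fun u v => u ≤ v) := by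
  have := PySem.List.sorted_pairwise_rev l (fun v : List Int => v)
  simpa [pvSortRev, List.pairwise_reverse] using this

-- A's intersection loop without its accumulator and dead interval-start state
def sweepP : Int → List (List Int) → List (List Int)
  | _, [] => []
  | b, [c, d] :: z => if c ≤ b then [c, min b d] :: sweepP (max b d) z else sweepP d z
  | _, _ :: _ => []

lemma pair_lt_iff {a b c d : Int} : (([a, b] : List Int) < [c, d]) ↔ (a < c ∨ (a = c ∧ b < d)) := by
  constructor
  · intro h
    cases h with
    | rel h => exact Or.inl h
    | cons h =>
      cases h with
      | rel h2 => exact Or.inr ⟨rfl, h2⟩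
      | cons h2 => cases h2
  · rintro (h | ⟨rfl, h⟩)
    · exact List.Lex.rel h
    · exact List.Lex.cons (List.Lex.rel h)

lemma pair_le_iff {a b c d : Int} : (([a, b] : List Int) ≤ [c, d]) ↔ (a < c ∨ (a = c ∧ b ≤ d)) := by
  constructor
  · intro h
    have h2 := not_lt.mpr h
    rw [pair_lt_iff] at h2
    omega
  · intro h
    by_contra hn
    have h2 := not_le.mp hn
    rw [pair_lt_iff] at h2
    omega

lemma isPair_elim {e : List Int} (h : pvIsPair e = true) : ∃ u v, e = [u, v] := by
  match e, h with
  | [u, v], _ => exact ⟨u, v, rfl⟩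

lemma merge_nil_right (X : List (List Int)) : X.merge [] pvListLe = X := by
  cases X <;> simp

-- accumulator framing for A's two loops
lemma unionLoop_append (z : List (List Int)) (hz : ∀ e ∈ z, ∃ c d, e = [c, d]) :
    ∀ a b r, pvUnionLoop z a b r = r ++ pvUnionLoop z a b [] := by
  induction z with
  | nil => intro a b r; simp [pvUnionLoop]
  | cons e t ih =>
    intro a b r
    obtain ⟨c, d, rfl⟩ := hz _ (List.mem_cons_self ..)
    have ht : ∀ e ∈ t, ∃ c d, e = [c, d] := fun e he => hz e (List.mem_cons_of_mem _ he)
    simp only [pvUnionLoop, List.nil_append]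
    split_ifs with h
    · exact ih ht a (max b d) r
    · rw [ih ht c d (r ++ [[a, b]]), ih ht c d [[a, b]]]
      simp

lemma sweepLoop_eq_sweepP (z : List (List Int)) (hz : ∀ e ∈ z, ∃ c d, e = [c, d]) :
    ∀ a b r, pvSweepLoop z a b r = r ++ sweepP b z := by
  induction z with
  | nil => intro a b r; simp [pvSweepLoop, sweepP]
  | cons e t ih =>
    intro a b r
    obtain ⟨c, d, rfl⟩ := hz _ (List.mem_cons_self ..)
    have ht : ∀ e ∈ t, ∃ c d, e = [c, d] := fun e he => hz e (List.mem_cons_of_mem _ he)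
    simp only [pvSweepLoop, sweepP]
    split_ifs with h
    · rw [ih ht (min b d) (max b d) (r ++ [[c, min b d]])]; simp
    · exact ih ht c d r

-- the union loop keeps its output sorted: invariant over the (sorted) remaining stack
lemma unionLoop_sorted (z : List (List Int)) :
    ∀ a b, z.Pairwise (fun u v => u ≤ v) →
    (∀ e ∈ z, ∃ s ev, e = [s, ev] ∧ a ≤ s ∧ (s = a → b ≤ ev)) →
    ∃ bb t, pvUnionLoop z a b [] = [a, bb] :: t ∧ b ≤ bb ∧
      ([a, bb] :: t).Pairwise (fun u v => u ≤ v) ∧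
      (∀ e ∈ ([a, bb] :: t), ∃ u v, e = [u, v]) := by
  induction z with
  | nil =>
    intro a b _ _
    exact ⟨b, [], rfl, le_refl _, by simp, by simp⟩
  | cons e z' ih =>
    intro a b hs hI
    obtain ⟨c, d, rfl, hac, himp⟩ := hI _ (List.mem_cons_self ..)
    have hhd : ∀ e ∈ z', ([c, d] : List Int) ≤ e := (List.pairwise_cons.mp hs).1
    have hs' := (List.pairwise_cons.mp hs).2
    have hzp' : ∀ e ∈ z', ∃ u v, e = [u, v] := fun e he => by
      obtain ⟨s, ev, rfl, _, _⟩ := hI e (List.mem_cons_of_mem _ he)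
      exact ⟨s, ev, rfl⟩
    simp only [pvUnionLoop, List.nil_append]
    split_ifs with h
    · -- merge: the active end grows to max b d
      obtain ⟨bb, t, heq, hle, hp, hpair⟩ := ih a (max b d) hs' (by
        intro e he
        obtain ⟨s, ev, rfl, has, himp2⟩ := hI e (List.mem_cons_of_mem _ he)
        have hcs := pair_le_iff.mp (hhd _ he)
        refine ⟨s, ev, rfl, has, fun hsa => ?_⟩
        have hca : c = a := by omega
        have hbd : b ≤ d := himp hca
        omega)
      exact ⟨bb, t, heq, le_trans (le_max_left _ _) hle, hp, hpair⟩
    · -- emit [a,b]; (c,d) becomes the active interval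
      obtain ⟨dd, t', heq, hled, hp, hpair⟩ := ih c d hs' (by
        intro e he
        obtain ⟨s, ev, rfl, _, _⟩ := hI e (List.mem_cons_of_mem _ he)
        have hcs := pair_le_iff.mp (hhd _ he)
        exact ⟨s, ev, rfl, by omega, fun hsc => by omega⟩)
      rw [unionLoop_append z' hzp' c d [[a, b]], heq]
      refine ⟨b, [c, dd] :: t', rfl, le_refl _, ?_, ?_⟩
      · refine List.pairwise_cons.mpr ⟨?_, hp⟩
        intro v hv
        have hab_cdd : ([a, b] : List Int) ≤ [c, dd] := by
          rw [pair_le_iff]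
          rcases eq_or_lt_of_le hac with hca | hca
        -- if a = c the pre-existing end b was below d (himp), hence below dd
          · exact Or.inr ⟨hca, by have := himp hca.symm; omega⟩
          · exact Or.inl hca
        rcases List.mem_cons.mp hv with rfl | hv
        · exact hab_cdd
        · exact le_trans hab_cdd ((List.pairwise_cons.mp hp).1 v hv)
      · intro e he
        rcases List.mem_cons.mp he with rfl | he
        · exact ⟨a, b, rfl⟩
        · exact hpair e he

-- the union of a Pre_-admitted input is a nonempty sorted list of pairs
lemma union_spec (x : List (List Int)) (hx0 : x ≠ []) (hxp : ∀ e ∈ x, pvIsPair e = true) :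
    ∃ a bb t, interval_union x = [a, bb] :: t ∧
      (([a, bb] :: t).Pairwise (fun u v => u ≤ v)) ∧
      (∀ e ∈ ([a, bb] :: t), ∃ u v, e = [u, v]) := by
  have hsne : (pvSortRev x).reverse ≠ [] := by
    simpa [pvSortRev_eq_nil_iff] using hx0
  obtain ⟨e, z, hs⟩ := List.exists_cons_of_ne_nil hsne
  have hmem : ∀ v ∈ (pvSortRev x).reverse, pvIsPair v = true := by
    intro v hv
    rw [List.mem_reverse, pvSortRev_mem] at hv
    exact hxp v hv
  obtain ⟨a, b, rfl⟩ := isPair_elim (hmem e (hs ▸ List.mem_cons_self ..))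
  have hpw := pvSortRev_reverse_pairwise x
  rw [hs] at hpw
  have hhd := (List.pairwise_cons.mp hpw).1
  have hs' := (List.pairwise_cons.mp hpw).2
  have hu : interval_union x = pvUnionLoop z a b [] := by
    simp only [interval_union, hs]
  obtain ⟨bb, t, heq, _, hp, hpair⟩ := unionLoop_sorted z a b hs' (by
    intro e he
    obtain ⟨s, ev, rfl⟩ := isPair_elim (hmem e (hs ▸ List.mem_cons_of_mem _ he))
    have := pair_le_iff.mp (hhd _ he)
    exact ⟨s, ev, rfl, by omega, fun hsa => by omega⟩)
  exact ⟨a, bb, t, by rw [hu, heq], hp, hpair⟩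

-- the combined reverse-sorted list, consumed from the end, is the stable merge of the two sorted unions
lemma sortedrev_reverse_eq_merge (X Y : List (List Int))
    (hX : X.Pairwise (fun u v => u ≤ v)) (hY : Y.Pairwise (fun u v => u ≤ v)) :
    (pvSortRev (X ++ Y)).reverse = X.merge Y pvListLe := by
  apply PySem.List.eq_of_perm_of_pairwise_le_of_injective (fun v : List Int => v)
      (fun _ _ h => h)
  · exact ((List.reverse_perm _).trans (pvSortRev_perm _)).trans
      (List.merge_perm_append pvListLe).symm
  · exact pvSortRev_reverse_pairwise (X ++ Y)
  · have := List.pairwise_merge (le := pvListLe)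
      (fun a b c hab hbc => by
        simp only [pvListLe, decide_eq_true_eq] at *; exact le_trans hab hbc)
      (fun a b => by simp only [pvListLe, Bool.or_eq_true, decide_eq_true_eq]; exact le_total a b)
      X Y (by simpa [pvListLe] using hX) (by simpa [pvListLe] using hY)
    simpa [pvListLe] using this

-- the heart: A's sweep over the merged list = B's fused merge-and-sweep
lemma sweep_eq_ms (n : Nat) :
    ∀ X Y b, X.length + Y.length ≤ n →
    (∀ e ∈ X, ∃ u v, e = [u, v]) → (∀ e ∈ Y, ∃ u v, e = [u, v]) →
    sweepP b (X.merge Y pvListLe) = pvMSLoop X Y b := by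
  induction n using Nat.strong_induction_on with
  | _ n IH =>
  intro X Y b hlen hXp hYp
  cases X with
  | nil =>
    cases Y with
    | nil => rw [List.nil_merge]; simp [sweepP, pvMSLoop]
    | cons ye ys =>
      obtain ⟨c, d, rfl⟩ := hYp _ (List.mem_cons_self ..)
      have hYp' : ∀ e ∈ ys, ∃ u v, e = [u, v] := fun e he => hYp e (List.mem_cons_of_mem _ he)
      simp only [List.length_cons, List.length_nil] at hlen
      rw [List.nil_merge]
      simp only [sweepP, pvMSLoop]
      have h1 := IH ys.length (by omega) [] ys (max b d) (by simp) (by simp) hYp'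
      have h2 := IH ys.length (by omega) [] ys d (by simp) (by simp) hYp'
      rw [List.nil_merge] at h1 h2
      split_ifs
      · rw [h1]
      · rw [h2]
  | cons xe xs =>
    obtain ⟨c, d, rfl⟩ := hXp _ (List.mem_cons_self ..)
    have hXp' : ∀ e ∈ xs, ∃ u v, e = [u, v] := fun e he => hXp e (List.mem_cons_of_mem _ he)
    simp only [List.length_cons] at hlen
    cases Y with
    | nil =>
      rw [merge_nil_right]
      simp only [sweepP, pvMSLoop]
      have h1 := IH xs.length (by omega) xs [] (max b d) (by simp) hXp' (by simp)
      have h2 := IH xs.length (by omega) xs [] d (by simp) hXp' (by simp)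
      rw [merge_nil_right] at h1 h2
      split_ifs
      · rw [h1]
      · rw [h2]
    | cons ye ys =>
      obtain ⟨c', d', rfl⟩ := hYp _ (List.mem_cons_self ..)
      have hYp' : ∀ e ∈ ys, ∃ u v, e = [u, v] := fun e he => hYp e (List.mem_cons_of_mem _ he)
      simp only [List.length_cons] at hlen
      rw [List.cons_merge_cons]
      by_cases hm : pvListLe [c, d] [c', d'] = true
      · rw [if_pos hm, pvMSLoop, if_pos hm]
        simp only [sweepP]
        split_ifs
        · rw [IH (xs.length + (ys.length + 1)) (by omega) xs ([c', d'] :: ys) (max b d)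
            (by simp) hXp' hYp]
        · rw [IH (xs.length + (ys.length + 1)) (by omega) xs ([c', d'] :: ys) d
            (by simp) hXp' hYp]
      · rw [if_neg hm, pvMSLoop, if_neg hm]
        simp only [sweepP]
        split_ifs
        · rw [IH (xs.length + 1 + ys.length) (by omega) ([c, d] :: xs) ys (max b d')
            (by simp) hXp hYp']
        · rw [IH (xs.length + 1 + ys.length) (by omega) ([c, d] :: xs) ys d'
            (by simp) hXp hYp']

-- ===== VERDICT (by name: the statement is the Claim_ definition above) =====
theorem interval_set_intersection_spec : Claim_equal_interval_set_intersection := by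
  intro x y _ hpre
  obtain ⟨hx0, hy0, hxp, hyp⟩ := hpre
  obtain ⟨a1, b1, xs, hxu, hpwx, hpairx⟩ := union_spec x hx0 hxp
  obtain ⟨a2, b2, ys, hyu, hpwy, hpairy⟩ := union_spec y hy0 hyp
  simp only [Spec_interval_set_intersection, interval_set_intersection,
    interval_set_intersection_alt, hxu, hyu]
  rw [sortedrev_reverse_eq_merge _ _ hpwx hpwy]
  by_cases hm : pvListLe [a1, b1] [a2, b2] = true
  · rw [List.cons_merge_cons, if_pos hm, if_pos hm]
    have hpairs : ∀ e ∈ xs.merge ([a2, b2] :: ys) pvListLe, ∃ c d, e = [c, d] := by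
      intro e he
      rcases List.mem_merge.mp he with h | h
      · exact hpairx e (List.mem_cons_of_mem _ h)
      · exact hpairy e h
    show pvSweepLoop (xs.merge ([a2, b2] :: ys) pvListLe) a1 b1 [] =
      pvMSLoop xs ([a2, b2] :: ys) b1
    rw [sweepLoop_eq_sweepP _ hpairs a1 b1 [], List.nil_append]
    exact sweep_eq_ms (xs.length + ([a2, b2] :: ys).length) xs ([a2, b2] :: ys) b1
      (le_refl _) (fun e he => hpairx e (List.mem_cons_of_mem _ he)) hpairy
  · rw [List.cons_merge_cons, if_neg hm, if_neg hm]
    have hpairs : ∀ e ∈ ([a1, b1] :: xs).merge ys pvListLe, ∃ c d, e = [c, d] := by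
      intro e he
      rcases List.mem_merge.mp he with h | h
      · exact hpairx e h
      · exact hpairy e (List.mem_cons_of_mem _ h)
    show pvSweepLoop (([a1, b1] :: xs).merge ys pvListLe) a2 b2 [] =
      pvMSLoop ([a1, b1] :: xs) ys b2
    rw [sweepLoop_eq_sweepP _ hpairs a2 b2 [], List.nil_append]
    exact sweep_eq_ms (([a1, b1] :: xs).length + ys.length) ([a1, b1] :: xs) ys b2
      (le_refl _) hpairx (fun e he => hpairy e (List.mem_cons_of_mem _ he))
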